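-- pv_equiv track=rewrite | github.com/gauravsharma2/UTD-CS-Semester-2 | IR/Material_IR/Homework2/IRHomework2.py | get_frontcodingstring
-- ===== SOURCE A (Python) =====
-- def get_frontcodingstring(terms_list):
--     frontCodingString = ""
--     sz, ret = zip(*terms_list), ""
--     for c in sz:
--         if len(set(c)) > 1:
--             break
--         ret += c[0]
--     frontCodingString += str(len(terms_list[0])) + ret + "*" + terms_list[0][len(ret):] + str(1) + "<>"
--     i = 1
--     while (i < len(terms_list)):
--         temp_str = terms_list[i]
--         res = temp_str[len(ret):]
--         frontCodingString += res + str(i + 1) + "<>"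
--         i += 1
--     frontCodingString = frontCodingString[:-len("<>")]
--     return frontCodingString
-- ===== SOURCE B (Python) =====
-- def get_frontcodingstring(terms_list):
--     prefix = terms_list[0]
--     for t in terms_list[1:]:
--         k = 0
--         while k < len(prefix) and k < len(t) and prefix[k] == t[k]:
--             k += 1
--         prefix = prefix[:k]
--     pieces = [str(len(terms_list[0])) + prefix + "*" + terms_list[0][len(prefix):] + "1"]
--     for i in range(1, len(terms_list)):
--         pieces.append(terms_list[i][len(prefix):] + str(i + 1))
--     return "<>".join(pieces)
-- ===== Notes on version B (the rewrite author's own statement) =====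
-- stated objective: faster
-- what changed: B computes the common prefix by folding a pairwise longest-common-prefix over the terms instead of transposing into columns and testing len(set(column)) per column, and builds the output as '<>'.join of a list of pieces instead of repeated string += followed by trimming the trailing separator.
import Mathlib
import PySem

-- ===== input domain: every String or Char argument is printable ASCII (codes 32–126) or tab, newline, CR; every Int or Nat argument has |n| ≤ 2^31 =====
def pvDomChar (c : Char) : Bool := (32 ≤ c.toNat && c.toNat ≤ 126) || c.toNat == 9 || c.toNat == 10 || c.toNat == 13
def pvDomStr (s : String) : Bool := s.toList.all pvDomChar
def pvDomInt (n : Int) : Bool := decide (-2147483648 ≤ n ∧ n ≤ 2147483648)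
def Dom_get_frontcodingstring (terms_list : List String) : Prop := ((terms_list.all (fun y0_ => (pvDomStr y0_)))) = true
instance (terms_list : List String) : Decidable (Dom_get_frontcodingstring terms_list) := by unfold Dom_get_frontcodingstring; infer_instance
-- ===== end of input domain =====

-- B replaces A's column-by-column transpose-and-set scan by a term-by-term fold that shrinks a
-- running common prefix, and builds the result as '<>'.join of pieces instead of repeated
-- string += then trimming (objective: faster; a timing run measured B faster on large inputs).

-- ===== PORT A =====
-- len(terms_list[0]) after 'zip(*terms_list)': the zip truncates at the shortest term
def pvMinLenA (ts : List (List Char)) : Nat :=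
  match ts with
  | [] => 0
  | s :: rest => rest.foldl (fun m t => min m t.length) s.length

-- sz = zip(*terms_list): column i holds the i-th character of every term (all indices in range)
def pvColsA (ts : List (List Char)) : List (List Char) :=
  (List.range (pvMinLenA ts)).map (fun i => ts.map (fun s => s.getD i ' '))

-- the 'for c in sz: if len(set(c)) > 1: break; ret += c[0]' loop
def pvRetA : List (List Char) → List Char
  | [] => []
  | c :: rest =>
    if PySem.Set.len (PySem.Set.ofList c) > 1 then []
    else c.getD 0 ' ' :: pvRetA rest

def get_frontcodingstring (terms_list : List String) : String :=
  let ts := terms_list.map String.toList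
  let ret := pvRetA (pvColsA ts)
  let first := PySem.List.pyGetD ts 0 []   -- terms_list[0]; in range under Pre_
  -- terms_list[0][len(ret):] is a slice with a nonnegative index: List.drop
  let s1 := PySem.Int.toChars (first.length : Int) ++ ret ++ ['*'] ++ first.drop ret.length ++ ['1'] ++ ['<', '>']
  let body := (PySem.List.pyRange 1 (ts.length : Int) 1).foldl
      (fun acc i => acc ++ (PySem.List.pyGetD ts i []).drop ret.length ++ PySem.Int.toChars (i + 1) ++ ['<', '>']) s1
  String.ofList (PySem.List.slice body none (some (-2)))   -- frontCodingString[:-2]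

-- ===== PORT B =====
-- 'while k < len(prefix) and k < len(t) and prefix[k] == t[k]: k += 1; prefix = prefix[:k]'
def pvLcp2 : List Char → List Char → List Char
  | a :: as, b :: bs => if a = b then a :: pvLcp2 as bs else []
  | _, _ => []

def get_frontcodingstring_alt (terms_list : List String) : String :=
  let ts := terms_list.map String.toList
  let first := PySem.List.pyGetD ts 0 []   -- terms_list[0]; in range under Pre_
  let pref := (ts.drop 1).foldl pvLcp2 first   -- for t in terms_list[1:]
  let pieces := (PySem.Int.toChars (first.length : Int) ++ pref ++ ['*'] ++ first.drop pref.length ++ ['1'])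
      :: (PySem.List.pyRange 1 (ts.length : Int) 1).map
           (fun i => (PySem.List.pyGetD ts i []).drop pref.length ++ PySem.Int.toChars (i + 1))
  String.ofList (PySem.Chars.join ['<', '>'] pieces)   -- "<>".join(pieces)

-- ===== PRECONDITION & SPEC =====
-- Pre_ excludes only the empty list, on which A (terms_list[0]) raises IndexError.
def Pre_get_frontcodingstring (terms_list : List String) : Prop := terms_list ≠ []
instance (terms_list : List String) : Decidable (Pre_get_frontcodingstring terms_list) := by
  unfold Pre_get_frontcodingstring; infer_instance
def pvWitness_get_frontcodingstring : List String := ["abc", "abd"]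
def Spec_get_frontcodingstring (terms_list : List String) (out : String) : Prop := out = get_frontcodingstring_alt terms_list
instance (terms_list : List String) (out : String) : Decidable (Spec_get_frontcodingstring terms_list out) := by unfold Spec_get_frontcodingstring; infer_instance

-- ===== CLAIM (what is proved, stated in full; the proofs are below) =====
def Claim_equal_get_frontcodingstring : Prop := ∀ (terms_list : List String), Dom_get_frontcodingstring terms_list → Pre_get_frontcodingstring terms_list → Spec_get_frontcodingstring terms_list (get_frontcodingstring terms_list)

-- ===== LEMMAS AND PROOFS =====

theorem pvLcp2_prefix_left (a b : List Char) : pvLcp2 a b <+: a := by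
  induction a generalizing b with
  | nil => cases b <;> simp [pvLcp2]
  | cons x xs ih =>
    cases b with
    | nil => simp [pvLcp2]
    | cons y ys =>
      by_cases h : x = y <;> simp [pvLcp2, h, ih]

theorem pvLcp2_prefix_right (a b : List Char) : pvLcp2 a b <+: b := by
  induction a generalizing b with
  | nil => cases b <;> simp [pvLcp2]
  | cons x xs ih =>
    cases b with
    | nil => simp [pvLcp2]
    | cons y ys =>
      by_cases h : x = y <;> simp [pvLcp2, h, ih]

theorem pvLcp2_greatest (p a b : List Char) (ha : p <+: a) (hb : p <+: b) : p <+: pvLcp2 a b := by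
  induction p generalizing a b with
  | nil => simp
  | cons c cs ih =>
    obtain ⟨ta, rfl⟩ := ha
    obtain ⟨tb, hb'⟩ := hb
    cases b with
    | nil => simp at hb'
    | cons y ys =>
      simp at hb'
      obtain ⟨rfl, hys⟩ := hb'
      simp [pvLcp2]
      exact ih _ _ (by simp) ⟨tb, hys⟩

theorem foldl_lcp_prefix (rest : List (List Char)) (f : List Char) :
    rest.foldl pvLcp2 f <+: f ∧ ∀ t ∈ rest, rest.foldl pvLcp2 f <+: t := by
  induction rest generalizing f with
  | nil => simp
  | cons t rs ih =>
    obtain ⟨h1, h2⟩ := ih (pvLcp2 f t)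
    refine ⟨h1.trans (pvLcp2_prefix_left f t), ?_⟩
    intro u hu
    simp at hu
    rcases hu with rfl | hu
    · exact h1.trans (pvLcp2_prefix_right f u)
    · exact h2 u hu

theorem foldl_lcp_greatest (rest : List (List Char)) (f p : List Char)
    (hf : p <+: f) (ht : ∀ t ∈ rest, p <+: t) : p <+: rest.foldl pvLcp2 f := by
  induction rest generalizing f with
  | nil => exact hf
  | cons t rs ih =>
    exact ih (pvLcp2 f t) (pvLcp2_greatest _ _ _ hf (ht t (by simp)))
      (fun u hu => ht u (by simp [hu]))

theorem foldmin_le (rest : List (List Char)) (a : Nat) :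
    rest.foldl (fun m t => min m t.length) a ≤ a ∧
    ∀ t ∈ rest, rest.foldl (fun m t => min m t.length) a ≤ t.length := by
  induction rest generalizing a with
  | nil => simp
  | cons t rs ih =>
    obtain ⟨h1, h2⟩ := ih (min a t.length)
    refine ⟨h1.trans (by omega), ?_⟩
    intro u hu
    simp at hu
    rcases hu with rfl | hu
    · exact h1.trans (by omega)
    · exact h2 u hu

theorem le_foldmin (rest : List (List Char)) (a n : Nat)
    (ha : n ≤ a) (ht : ∀ t ∈ rest, n ≤ t.length) :
    n ≤ rest.foldl (fun m t => min m t.length) a := by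
  induction rest generalizing a with
  | nil => exact ha
  | cons t rs ih =>
    exact ih (min a t.length) (by have := ht t (by simp); omega)
      (fun u hu => ht u (by simp [hu]))

-- len(set(x :: l)) ≤ 1 iff every element of l equals x
theorem setlen_le_one_iff (x : Char) (l : List Char) :
    PySem.Set.len (PySem.Set.ofList (x :: l)) ≤ 1 ↔ ∀ y ∈ l, y = x := by
  rw [PySem.Set.ofList_cons]
  rw [show ∀ s : PySem.Set Char, PySem.Set.len s = s.length from fun _ => rfl]
  simp [List.length_eq_zero_iff, List.eq_nil_iff_forall_not_mem, PySem.Set.mem_discard, PySem.Set.mem_ofList]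

theorem retA_struct (f : List Char) (rest : List (List Char)) :
    ∀ (n a : Nat),
    ∃ k, k ≤ n ∧
      pvRetA ((List.range' a n).map (fun i => ((f :: rest).map (fun s => s.getD i ' ')))) =
        (List.range' a k).map (fun i => f.getD i ' ') ∧
      (∀ j, a ≤ j → j < a + k → ∀ t ∈ rest, t.getD j ' ' = f.getD j ' ') ∧
      (k = n ∨ ∃ t ∈ rest, t.getD (a + k) ' ' ≠ f.getD (a + k) ' ') := by
  intro n
  induction n with
  | zero => intro a; exact ⟨0, le_refl _, by simp [pvRetA], by omega, Or.inl rfl⟩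
  | succ n ih =>
    intro a
    rw [List.range'_succ]
    by_cases hc : ∀ t ∈ rest, t.getD a ' ' = f.getD a ' '
    · -- constant column: take the char and recurse
      obtain ⟨k, hk, heq, hconst, hlast⟩ := ih (a + 1)
      refine ⟨k + 1, by omega, ?_, ?_, ?_⟩
      · simp only [List.map_cons] at heq
        simp only [List.map_cons, pvRetA]
        rw [if_neg, List.range'_succ, List.map_cons]
        · rw [heq]; simp
        · simp only [not_lt]
          rw [setlen_le_one_iff]
          intro y hy
          simp at hy
          obtain ⟨t, ht, rfl⟩ := hy
          exact hc t ht
      · intro j hj1 hj2 t ht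
        rcases Nat.eq_or_lt_of_le hj1 with rfl | hj1'
        · exact hc t ht
        · exact hconst j hj1' (by omega) t ht
      · rcases hlast with rfl | ⟨t, ht, hne⟩
        · exact Or.inl rfl
        · exact Or.inr ⟨t, ht, by rw [Nat.add_comm k 1, ← Nat.add_assoc]; exact hne⟩
    · -- non-constant column: break
      rw [not_forall] at hc
      simp only [not_forall, exists_prop] at hc
      obtain ⟨t, ht, hne⟩ := hc
      refine ⟨0, by omega, ?_, by omega, Or.inr ⟨t, ht, by simpa using hne⟩⟩
      simp only [List.map_cons, pvRetA]
      rw [if_pos]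
      · simp
      · by_contra h
        simp only [not_lt] at h
        rw [setlen_le_one_iff] at h
        exact hne (h _ (by simp; exact ⟨t, ht, rfl⟩))

theorem map_getD_range' (f : List Char) (K : Nat) (h : K ≤ f.length) :
    (List.range' 0 K).map (fun i => f.getD i ' ') = f.take K := by
  apply List.ext_getElem
  · simp [h]
  · intro j h1 h2
    simp only [List.getElem_map, List.getElem_range', List.getElem_take]
    rw [List.getD_eq_getElem]
    · simp
    · simp at h1; omega

theorem ret_eq_lcp (f : List Char) (rest : List (List Char)) :
    pvRetA (pvColsA (f :: rest)) = rest.foldl pvLcp2 f := by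
  have hM := foldmin_le rest f.length
  obtain ⟨k, hkM, heq, hconst, hlast⟩ := retA_struct f rest (pvMinLenA (f :: rest)) 0
  have hMdef : pvMinLenA (f :: rest) = rest.foldl (fun m t => min m t.length) f.length := rfl
  have hkf : k ≤ f.length := le_trans hkM (hMdef ▸ hM.1)
  have hkt : ∀ t ∈ rest, k ≤ t.length := fun t ht => le_trans hkM (hMdef ▸ hM.2 t ht)
  rw [pvColsA, List.range_eq_range', heq, map_getD_range' f k hkf]
  have hLf := (foldl_lcp_prefix rest f).1
  have hLt := (foldl_lcp_prefix rest f).2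
  -- f.take k is a common prefix
  have htk : ∀ t ∈ rest, f.take k <+: t := by
    intro t ht
    have hfk : f.take k = t.take k := by
      apply List.ext_getElem
      · rw [List.length_take, List.length_take]; have := hkt t ht; omega
      · intro j hj1 hj2
        simp only [List.getElem_take]
        have hjf : j < f.length := by simp at hj1; omega
        have hjt : j < t.length := by simp at hj1; have := hkt t ht; omega
        have := hconst j (by omega) (by simp at hj1; omega) t ht
        rw [List.getD_eq_getElem _ _ hjf, List.getD_eq_getElem _ _ hjt] at this
        exact this.symm
    rw [hfk]
    exact List.take_prefix k t
  have h1 : f.take k <+: rest.foldl pvLcp2 f :=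
    foldl_lcp_greatest rest f _ (List.take_prefix k f) htk
  -- the fold is no longer than k
  have hlen : (rest.foldl pvLcp2 f).length ≤ k := by
    rcases hlast with hkn | ⟨t, ht, hne⟩
    · rw [hkn, hMdef]
      exact le_foldmin rest f.length _ hLf.length_le (fun t ht => (hLt t ht).length_le)
    · by_contra hgt
      simp only [not_le] at hgt
      have hkf' : k < f.length := lt_of_lt_of_le hgt hLf.length_le
      have hkt' : k < t.length := lt_of_lt_of_le hgt (hLt t ht).length_le
      apply hne
      simp only [Nat.zero_add]
      rw [List.getD_eq_getElem _ _ hkt', List.getD_eq_getElem _ _ hkf']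
      exact (List.IsPrefix.getElem (hLt t ht) hgt).symm.trans (List.IsPrefix.getElem hLf hgt)
  have h2 : rest.foldl pvLcp2 f <+: f.take k := by
    rw [List.prefix_take_iff]
    exact ⟨hLf, hlen⟩
  exact List.IsPrefix.eq_of_length_le h1 (h2.length_le)

theorem joinSep (sep : List Char) : ∀ (ps : List (List Char)) (p : List Char),
    ((p :: ps).map (fun q => q ++ sep)).flatten = PySem.Chars.join sep (p :: ps) ++ sep := by
  intro ps
  induction ps with
  | nil => intro p; simp [PySem.Chars.join_singleton]
  | cons q qs ih =>
    intro p
    rw [PySem.Chars.join_cons_cons]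
    have := ih q
    simp only [List.map_cons, List.flatten_cons] at this ⊢
    rw [this]
    simp [List.append_assoc]

theorem assemble (p0 : List Char) (l : List Int) (g : Int → List Char) :
    PySem.List.slice (l.foldl (fun acc i => acc ++ (g i ++ ['<', '>'])) (p0 ++ ['<', '>'])) none (some (-2)) =
      PySem.Chars.join ['<', '>'] (p0 :: l.map g) := by
  rw [PySem.List.foldl_append_eq_flatMap]
  have hb : (p0 ++ ['<', '>']) ++ l.flatMap (fun i => g i ++ ['<', '>']) =
      PySem.Chars.join ['<', '>'] (p0 :: l.map g) ++ ['<', '>'] := by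
    rw [← joinSep]
    simp only [List.map_cons, List.flatten_cons, List.flatMap_def, List.map_map]
    rw [Function.comp_def]
  rw [hb]
  rw [PySem.List.slice_to_neg_ofNat _ 2 (by omega)]
  simp [List.take_left']

-- ===== VERDICT (by name: the statement is the Claim_ definition above) =====
theorem get_frontcodingstring_spec : Claim_equal_get_frontcodingstring := by
  intro terms_list _ hpre
  unfold Spec_get_frontcodingstring
  cases terms_list with
  | nil => exact absurd rfl hpre
  | cons s ss =>
    simp only [get_frontcodingstring, get_frontcodingstring_alt, List.map_cons,
      PySem.List.pyGetD_zero_cons, List.drop_one, List.tail_cons]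
    rw [ret_eq_lcp]
    apply congrArg String.ofList
    have h := assemble
      (PySem.Int.toChars (s.toList.length : Int) ++ (ss.map String.toList).foldl pvLcp2 s.toList ++ ['*'] ++
        s.toList.drop ((ss.map String.toList).foldl pvLcp2 s.toList).length ++ ['1'])
      (PySem.List.pyRange 1 ((s.toList :: ss.map String.toList).length : Int) 1)
      (fun i => (PySem.List.pyGetD (s.toList :: ss.map String.toList) i []).drop
        ((ss.map String.toList).foldl pvLcp2 s.toList).length ++ PySem.Int.toChars (i + 1))
    simp only [List.append_assoc] at h ⊢
    exact h
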